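-- pv_equiv track=rewrite | github.com/KaleabKindu/competetive_programming | 1630-arithmetic-subarrays/1630-arithmetic-subarrays.py | check
-- ===== SOURCE A (Python) =====
-- def check(l,r,nums):
--     temp=nums[l:r+1]
--     temp.sort()
--     i=0
--     while i < len(temp)-1:
--         if temp[i+1]-temp[i] != temp[1]-temp[0]:
--             return False
--         i+=1
--     return True
-- ===== SOURCE B (Python) =====
-- def check(l, r, nums):
--     temp = nums[l:r+1]
--     n = len(temp)
--     if n <= 1:
--         return True
--     mn = min(temp)
--     mx = max(temp)
--     if mn == mx:
--         return True
--     if (mx - mn) % (n - 1) != 0: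
--         return False
--     d = (mx - mn) // (n - 1)
--     seen = set(temp)
--     if len(seen) != n:
--         return False
--     return all((x - mn) % d == 0 for x in seen)
-- ===== Notes on version B (the rewrite author's own statement) =====
-- stated objective: alternative
-- what changed: Replaces sort-then-scan-adjacent-differences with a min/max + divisibility + set-distinctness check that the slice's values are exactly the arithmetic grid (no sorting; intended as the O(k) variant, but a timing run did not consistently confirm a 1.5x speed-up, so no speed is claimed).
import Mathlib
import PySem

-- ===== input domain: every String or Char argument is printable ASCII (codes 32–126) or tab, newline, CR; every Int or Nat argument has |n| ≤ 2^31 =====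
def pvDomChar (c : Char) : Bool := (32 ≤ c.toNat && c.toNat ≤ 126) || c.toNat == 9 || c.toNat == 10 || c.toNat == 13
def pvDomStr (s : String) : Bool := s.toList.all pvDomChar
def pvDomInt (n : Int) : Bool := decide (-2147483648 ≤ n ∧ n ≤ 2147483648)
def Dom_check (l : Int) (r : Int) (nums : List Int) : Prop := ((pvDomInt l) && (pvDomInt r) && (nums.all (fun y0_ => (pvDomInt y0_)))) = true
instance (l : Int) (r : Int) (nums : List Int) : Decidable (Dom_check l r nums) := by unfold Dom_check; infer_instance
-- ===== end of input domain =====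

-- B replaces A's sort + adjacent-difference scan by a min/max + divisibility + distinctness check.

-- ===== PORT A =====
-- A's while loop over the sorted slice.  All Python indices here (i, i+1, 0, 1) are
-- nonnegative and in range whenever evaluated (the body runs only for 0 ≤ i < len-1, hence
-- len ≥ 2), so temp[k] = List.getD temp k 0 exactly; the guard 'i < len(temp)-1' agrees with
-- the Nat form since i ≥ 0 (for len = 0 both sides are false).
def checkLoop (temp : List Int) (i : Nat) : Bool :=
  if _h : i < temp.length - 1 then
    if temp.getD (i+1) 0 - temp.getD i 0 ≠ temp.getD 1 0 - temp.getD 0 0 then false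
    else checkLoop temp (i+1)
  else true
termination_by temp.length - 1 - i
decreasing_by omega

def check (l : Int) (r : Int) (nums : List Int) : Bool :=
  checkLoop (PySem.List.sorted (PySem.List.slice nums (some l) (some (r+1))) (fun x => x)) 0

-- ===== PORT B =====
-- body of Source B after taking the slice; whenever the n ≥ 2 branch is reached the slice is
-- nonempty, so Python's min()/max() return (the '.getD 0' default is unreachable).
def altBody (temp : List Int) : Bool :=
  let n := temp.length
  if n ≤ 1 then true
  else
    let mn := (PySem.List.min? temp (fun x => x)).getD 0
    let mx := (PySem.List.max? temp (fun x => x)).getD 0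
    if mn = mx then true
    else if PySem.Int.mod (mx - mn) ((n : Int) - 1) ≠ 0 then false
    else
      let d := PySem.Int.floordiv (mx - mn) ((n : Int) - 1)
      let seen : PySem.Set Int := PySem.Set.ofList temp
      if PySem.Set.len seen ≠ (n : Int) then false
      else seen.all (fun x => PySem.Int.mod (x - mn) d == 0)

def check_alt (l : Int) (r : Int) (nums : List Int) : Bool :=
  altBody (PySem.List.slice nums (some l) (some (r+1)))

-- ===== PRECONDITION & SPEC =====
def Spec_check (l : Int) (r : Int) (nums : List Int) (out : Bool) : Prop := out = check_alt l r nums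
instance (l : Int) (r : Int) (nums : List Int) (out : Bool) : Decidable (Spec_check l r nums out) := by unfold Spec_check; infer_instance

-- ===== CLAIM (what is proved, stated in full; the proofs are below) =====
def Claim_equal_check : Prop := ∀ (l : Int) (r : Int) (nums : List Int), Dom_check l r nums → Spec_check l r nums (check l r nums)

-- ===== LEMMAS AND PROOFS =====

-- characterisation of A's loop
lemma checkLoop_iff (temp : List Int) (i : Nat) :
    checkLoop temp i = true ↔
      ∀ j, i ≤ j → j + 1 < temp.length →
        temp.getD (j+1) 0 - temp.getD j 0 = temp.getD 1 0 - temp.getD 0 0 := by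
  generalize hk : temp.length - 1 - i = k
  induction k generalizing i with
  | zero =>
      rw [checkLoop]
      have hnc : ¬ i < temp.length - 1 := by omega
      rw [dif_neg hnc]
      constructor
      · intro _ j hij hj; exact absurd hj (by omega)
      · intro _; rfl
  | succ k ihk =>
      rw [checkLoop]
      by_cases hc : i < temp.length - 1
      · rw [dif_pos hc]
        by_cases hne : temp.getD (i+1) 0 - temp.getD i 0 ≠ temp.getD 1 0 - temp.getD 0 0
        · rw [if_pos hne]
          constructor
          · intro h; simp at h
          · intro h; exact absurd (h i le_rfl (by omega)) hne
        · rw [if_neg hne]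
          push Not at hne
          rw [ihk (i+1) (by omega)]
          constructor
          · intro h j hij hj
            rcases Nat.eq_or_lt_of_le hij with rfl | hlt
            · exact hne
            · exact h j hlt hj
          · intro h j hij hj; exact h j (by omega) hj
      · rw [dif_neg hc]
        constructor
        · intro _ j hij hj; exact absurd hj (by omega)
        · intro _; rfl

-- closed form of an adjacent-difference AP
lemma ap_getD (t : List Int)
    (h : ∀ j, j + 1 < t.length → t.getD (j+1) 0 - t.getD j 0 = t.getD 1 0 - t.getD 0 0) :
    ∀ j, j < t.length → t.getD j 0 = t.getD 0 0 + j * (t.getD 1 0 - t.getD 0 0) := by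
  intro j
  induction j with
  | zero => intro _; simp
  | succ j ihj =>
      intro hj
      have h1 := h j (by omega)
      have h2 := ihj (by omega)
      push_cast
      linarith

-- the arithmetic grid [mn, mn+d, …, mn+(n-1)d]
def grid (mn d : Int) (n : Nat) : List Int := (List.range n).map (fun (k : Nat) => mn + (k : Int) * d)

lemma grid_length (mn d : Int) (n : Nat) : (grid mn d n).length = n := by
  unfold grid; rw [List.length_map, List.length_range]

lemma grid_getD (mn d : Int) (n j : Nat) (h : j < n) :
    (grid mn d n).getD j 0 = mn + j * d := by
  unfold grid
  exact PySem.List.getD_map_range (fun k => mn + k * d) n j 0 h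

lemma grid_pairwise_lt (mn : Int) {d : Int} (hd : 0 < d) (n : Nat) :
    (grid mn d n).Pairwise (· < ·) := by
  unfold grid
  rw [List.pairwise_map]
  refine List.pairwise_lt_range.imp ?_
  intro a b hab
  have h1 : (a : Int) < (b : Int) := by exact_mod_cast hab
  nlinarith

lemma grid_mem {mn d : Int} {n : Nat} {x : Int} :
    x ∈ grid mn d n ↔ ∃ k : Nat, k < n ∧ x = mn + k * d := by
  unfold grid
  simp [eq_comm]

-- set(xs) has full length iff xs has no duplicates
lemma foldl_add_len_le (xs acc : List Int) :
    (xs.foldl PySem.Set.add acc).length ≤ acc.length + xs.length := by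
  induction xs generalizing acc with
  | nil => simp
  | cons x xs ih =>
      simp only [List.foldl_cons, List.length_cons]
      refine le_trans (ih _) ?_
      have : (PySem.Set.add acc x).length ≤ acc.length + 1 := by
        simp only [PySem.Set.add]; split <;> simp
      omega

lemma foldl_add_len_eq_iff (xs : List Int) : ∀ acc : List Int, acc.Nodup →
    ((xs.foldl PySem.Set.add acc).length = acc.length + xs.length ↔ (acc ++ xs).Nodup) := by
  induction xs with
  | nil => intro acc h; simp [h]
  | cons x xs ih =>
      intro acc hacc
      simp only [List.foldl_cons, List.length_cons]
      by_cases hx : x ∈ acc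
      · have hadd : PySem.Set.add acc x = acc := by
          simp [PySem.Set.add, PySem.Set.contains, hx]
        rw [hadd]
        constructor
        · intro h
          have hle := foldl_add_len_le xs acc
          omega
        · intro h
          exact absurd ((List.nodup_append.mp h).2.2 x hx x (List.mem_cons_self) rfl) (fun c => c)
      · have hadd : PySem.Set.add acc x = acc ++ [x] := by
          simp [PySem.Set.add, PySem.Set.contains, hx]
        have hacc' : (acc ++ [x]).Nodup := by
          rw [List.nodup_append]
          refine ⟨hacc, List.nodup_singleton x, ?_⟩
          intro a ha b hb
          rw [List.mem_singleton] at hb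
          subst hb
          exact fun heq => hx (heq ▸ ha)
        have h2 := ih (acc ++ [x]) hacc'
        rw [List.length_append, List.length_singleton, List.append_assoc, List.singleton_append] at h2
        rw [hadd, show acc.length + (xs.length + 1) = acc.length + 1 + xs.length by omega]
        exact h2

lemma ofList_len_iff (xs : List Int) :
    (PySem.Set.ofList xs : List Int).length = xs.length ↔ xs.Nodup := by
  have h := foldl_add_len_eq_iff xs [] List.nodup_nil
  simpa [PySem.Set.ofList, PySem.Set.empty] using h

lemma mem_ofList_int (xs : List Int) (x : Int) : x ∈ (PySem.Set.ofList xs : List Int) ↔ x ∈ xs := by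
  rw [← PySem.List.dedup_eq_ofList]; exact PySem.List.mem_dedup xs x

-- the central fact: A's loop on the sorted slice equals B's body on the slice
lemma main_eq (s : List Int) :
    checkLoop (PySem.List.sorted s (fun x => x)) 0 = altBody s := by
  set t := PySem.List.sorted s (fun x => x) with ht
  have hperm : t.Perm s := PySem.List.sorted_perm s _ false
  have hlen : t.length = s.length := hperm.length_eq
  by_cases hn : s.length ≤ 1
  · have hA : checkLoop t 0 = true := by
      rw [checkLoop]
      rw [dif_neg (by omega)]
    rw [hA]
    simp only [altBody]
    rw [if_pos hn]
  · push Not at hn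
    have h2s : 2 ≤ s.length := hn
    have h2t : 2 ≤ t.length := by omega
    have hs : s ≠ [] := by intro h; rw [h] at h2s; simp at h2s
    obtain ⟨mn, hmn⟩ : ∃ m, PySem.List.min? s (fun x => x) = some m := by
      cases h : PySem.List.min? s (fun x => x) with
      | none => exact absurd ((PySem.List.min?_eq_none_iff s _).mp h) hs
      | some m => exact ⟨m, rfl⟩
    obtain ⟨mx, hmx⟩ : ∃ m, PySem.List.max? s (fun x => x) = some m := by
      cases h : PySem.List.max? s (fun x => x) with
      | none => exact absurd ((PySem.List.max?_eq_none_iff s _).mp h) hs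
      | some m => exact ⟨m, rfl⟩
    have hmn_mem : mn ∈ s := PySem.List.min?_mem hmn
    have hmx_mem : mx ∈ s := PySem.List.max?_mem hmx
    have hmn_min : ∀ y ∈ s, mn ≤ y := PySem.List.min?_isMin hmn
    have hmx_max : ∀ y ∈ s, y ≤ mx := PySem.List.max?_isMax hmx
    -- shared facts
    have hmem_t : ∀ k, k < t.length → t.getD k 0 ∈ s := by
      intro k hk
      refine hperm.subset ?_
      rw [List.getD_eq_getElem t 0 hk]
      exact List.getElem_mem hk
    have ht00 : t.getD 0 0 = mn := by
      refine le_antisymm ?_ (hmn_min _ (hmem_t 0 (by omega)))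
      obtain ⟨j, hj, hje⟩ := List.mem_iff_getElem.mp (hperm.mem_iff.mpr hmn_mem)
      have hmono := PySem.List.key_sorted_getElem_mono s (fun x => x) (Nat.zero_le j) hj
      rw [List.getD_eq_getElem t 0 (by omega), ← hje]
      exact hmono
    simp only [altBody]
    rw [if_neg (by omega), hmn, hmx, Option.getD_some, Option.getD_some]
    by_cases hmm : mn = mx
    · rw [if_pos hmm]
      have he : ∀ k, k < t.length → t.getD k 0 = mn := by
        intro k hk
        have h1 := hmn_min _ (hmem_t k hk)
        have h2 := hmx_max _ (hmem_t k hk)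
        omega
      rw [(checkLoop_iff t 0).mpr ?_]
      intro j _ hj
      rw [he (j+1) hj, he j (by omega), he 1 (by omega), he 0 (by omega)]
    · rw [if_neg hmm]
      have hmnlt : mn < mx := lt_of_le_of_ne (hmn_min mx hmx_mem) hmm
      have hNpos : (0 : Int) < (s.length : Int) - 1 := by omega
      -- forward: A's loop succeeding forces B's three conditions
      have fwd : checkLoop t 0 = true →
          ((s.length : Int) - 1) ∣ (mx - mn) ∧ s.Nodup ∧
            ∀ x ∈ s, PySem.Int.floordiv (mx - mn) ((s.length : Int) - 1) ∣ (x - mn) := by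
        intro hA
        have hap : ∀ j, j + 1 < t.length →
            t.getD (j+1) 0 - t.getD j 0 = t.getD 1 0 - t.getD 0 0 :=
          fun j hj => (checkLoop_iff t 0).mp hA j (Nat.zero_le j) hj
        have hform := ap_getD t hap
        set d0 := t.getD 1 0 - t.getD 0 0 with hd0def
        have hd0 : 0 ≤ d0 := by
          have hmono := PySem.List.key_sorted_getElem_mono s (fun x => x)
            (show 0 ≤ 1 by omega) (show 1 < (PySem.List.sorted s (fun x => x)).length by rw [← ht]; omega)
          have h01 : t.getD 0 0 ≤ t.getD 1 0 := by
            rw [List.getD_eq_getElem t 0 (by omega), List.getD_eq_getElem t 0 (by omega)]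
            exact hmono
          omega
        have hmem_form : ∀ x ∈ s, ∃ j : Nat, j < t.length ∧ x = mn + j * d0 := by
          intro x hx
          obtain ⟨j, hj, hje⟩ := List.mem_iff_getElem.mp (hperm.mem_iff.mpr hx)
          refine ⟨j, hj, ?_⟩
          rw [← hje, ← List.getD_eq_getElem t 0 hj, hform j hj, ht00]
        have hd0pos : 0 < d0 := by
          rcases lt_or_eq_of_le hd0 with h | h
          · exact h
          · exfalso
            obtain ⟨j, hj, hje⟩ := hmem_form mx hmx_mem
            rw [← h] at hje
            simp at hje
            exact hmm (by omega)
        have hmxeq : mx = mn + ((s.length : Int) - 1) * d0 := by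
          have hcast : ((t.length - 1 : Nat) : Int) = (s.length : Int) - 1 := by omega
          have hup : mn + ((s.length : Int) - 1) * d0 ≤ mx := by
            have hlast := hmx_max _ (hmem_t (t.length - 1) (by omega))
            rw [hform (t.length - 1) (by omega), ht00, hcast] at hlast
            exact hlast
          obtain ⟨j, hj, hje⟩ := hmem_form mx hmx_mem
          have hjle : (j : Int) ≤ (s.length : Int) - 1 := by omega
          have hdown : mx ≤ mn + ((s.length : Int) - 1) * d0 := by
            rw [hje]
            have := mul_le_mul_of_nonneg_right hjle (le_of_lt hd0pos)
            omega
          exact le_antisymm hdown hup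
        have hDeq : PySem.Int.floordiv (mx - mn) ((s.length : Int) - 1) = d0 := by
          rw [show mx - mn = ((s.length : Int) - 1) * d0 by rw [hmxeq]; ring,
              PySem.Int.floordiv_eq_ediv_of_pos hNpos,
              Int.mul_ediv_cancel_left _ (ne_of_gt hNpos)]
        have htg : t = grid mn d0 s.length := by
          refine List.ext_getElem (by rw [hlen, grid_length]) ?_
          intro j h1 h2
          rw [← List.getD_eq_getElem t 0 h1, ← List.getD_eq_getElem (grid mn d0 s.length) 0 h2,
              hform j h1, ht00, grid_getD mn d0 s.length j (by omega)]
        have hnd : s.Nodup := by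
          rw [← hperm.nodup_iff, htg]
          exact ((grid_pairwise_lt mn hd0pos s.length).imp (fun h => ne_of_lt h))
        refine ⟨⟨d0, by rw [hmxeq]; ring⟩, hnd, ?_⟩
        intro x hx
        obtain ⟨j, _, hje⟩ := hmem_form x hx
        rw [hDeq]
        exact ⟨j, by rw [hje]; ring⟩
      -- backward: B's three conditions force A's loop to succeed
      have bwd : ((s.length : Int) - 1) ∣ (mx - mn) → s.Nodup →
          (∀ x ∈ s, PySem.Int.floordiv (mx - mn) ((s.length : Int) - 1) ∣ (x - mn)) →
          checkLoop t 0 = true := by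
        intro ha hb hc
        set D := PySem.Int.floordiv (mx - mn) ((s.length : Int) - 1) with hDdef
        have hd_eq : D * ((s.length : Int) - 1) = mx - mn := by
          rw [hDdef, PySem.Int.floordiv_eq_ediv_of_pos hNpos]
          exact Int.ediv_mul_cancel ha
        have hD_pos : 0 < D := by nlinarith [sub_pos.mpr hmnlt]
        have hsub : s ⊆ grid mn D s.length := by
          intro x hx
          obtain ⟨k, hk⟩ := hc x hx
          have h1 : 0 ≤ x - mn := sub_nonneg.mpr (hmn_min x hx)
          have h2 : x - mn ≤ D * ((s.length : Int) - 1) := by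
            rw [hd_eq]
            have := hmx_max x hx
            omega
          have hk0 : 0 ≤ k := by nlinarith
          have hkN : k ≤ (s.length : Int) - 1 := by nlinarith
          refine grid_mem.mpr ⟨k.toNat, by omega, ?_⟩
          rw [Int.toNat_of_nonneg hk0]
          linear_combination hk
        have hsp : s.Perm (grid mn D s.length) :=
          (hb.subperm hsub).perm_of_length_le (by rw [grid_length])
        have htg : t = grid mn D s.length := by
          rw [ht]
          exact PySem.List.sorted_eq_of_perm_of_pairwise_lt s _ (fun x => x) hsp.symm
            (grid_pairwise_lt mn hD_pos s.length)
        rw [checkLoop_iff]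
        intro j _ hj
        rw [htg] at hj ⊢
        rw [grid_length] at hj
        rw [grid_getD mn D s.length (j+1) hj, grid_getD mn D s.length j (by omega),
            grid_getD mn D s.length 1 (by omega), grid_getD mn D s.length 0 (by omega)]
        push_cast
        ring
      -- branch analysis of B's remaining conditions
      by_cases ha : ((s.length : Int) - 1) ∣ (mx - mn)
      · rw [if_neg (by rw [not_not, PySem.Int.mod_eq_zero_iff_dvd]; exact ha)]
        by_cases hb : s.Nodup
        · have hseen : PySem.Set.len (PySem.Set.ofList s) = (s.length : Int) := by
            simp only [PySem.Set.len]
            exact_mod_cast congrArg Nat.cast ((ofList_len_iff s).mpr hb)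
          rw [if_neg (by rw [not_not]; exact hseen)]
          by_cases hc : ∀ x ∈ s, PySem.Int.floordiv (mx - mn) ((s.length : Int) - 1) ∣ (x - mn)
          · rw [bwd ha hb hc]
            symm
            rw [List.all_eq_true]
            intro x hxs
            rw [beq_iff_eq, PySem.Int.mod_eq_zero_iff_dvd]
            exact hc x ((mem_ofList_int s x).mp hxs)
          · push Not at hc
            obtain ⟨x, hxs, hxd⟩ := hc
            have hall : (PySem.Set.ofList s : List Int).all
                (fun x => PySem.Int.mod (x - mn) (PySem.Int.floordiv (mx - mn) ((s.length : Int) - 1)) == 0) = false := by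
              rw [List.all_eq_false]
              refine ⟨x, (mem_ofList_int s x).mpr hxs, ?_⟩
              rw [beq_iff_eq, PySem.Int.mod_eq_zero_iff_dvd]
              exact hxd
            rw [hall]
            cases hA : checkLoop t 0 with
            | false => rfl
            | true => exact absurd ((fwd hA).2.2 x hxs) hxd
        · rw [if_pos ?_]
          · cases hA : checkLoop t 0 with
            | false => rfl
            | true => exact absurd (fwd hA).2.1 hb
          · intro h
            simp only [PySem.Set.len] at h
            exact hb ((ofList_len_iff s).mp (by exact_mod_cast h))
      · rw [if_pos (by rw [Ne, PySem.Int.mod_eq_zero_iff_dvd]; exact ha)]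
        cases hA : checkLoop t 0 with
        | false => rfl
        | true => exact absurd (fwd hA).1 ha

-- ===== VERDICT (by name: the statement is the Claim_ definition above) =====
theorem check_spec : Claim_equal_check := by
  intro l r nums _
  unfold Spec_check check check_alt
  exact main_eq _
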